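-- pv_equiv track=rewrite | github.com/esa/asn1scc | asn1python/src/asn1python/acn_encoder.py | _get_bits_per_char
-- ===== SOURCE A (Python) =====
-- def _get_bits_per_char(char_set_size: int) -> int:
--     """Calculate minimum bits needed to represent indices in a character set.
--
--     Args:
--         char_set_size: Size of the character set
--
--     Returns:
--         Number of bits needed per character index
--     """
--     if char_set_size <= 1:
--         return 1  # Special case: need at least 1 bit
--
--     # Calculate ceil(log2(char_set_size))
--     bits_needed = 0
--     temp = char_set_size - 1
--     while temp > 0:
--         bits_needed += 1
--         temp >>= 1
--     return bits_needed
-- ===== SOURCE B (Python) =====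
-- def _get_bits_per_char(char_set_size: int) -> int:
--     # Grow a power-of-two capacity until it covers the character set:
--     # the answer is the smallest bits >= 1 with 2**bits >= char_set_size.
--     bits = 1
--     capacity = 2
--     while capacity < char_set_size:
--         capacity *= 2
--         bits += 1
--     return bits
-- ===== Notes on version B (the rewrite author's own statement) =====
-- stated objective: alternative
-- what changed: Instead of shifting char_set_size-1 down and counting the shifts (with a <=1 guard), B grows a power-of-two capacity upward, doubling it until it covers the set; no special-case guard is needed.
import Mathlib
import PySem

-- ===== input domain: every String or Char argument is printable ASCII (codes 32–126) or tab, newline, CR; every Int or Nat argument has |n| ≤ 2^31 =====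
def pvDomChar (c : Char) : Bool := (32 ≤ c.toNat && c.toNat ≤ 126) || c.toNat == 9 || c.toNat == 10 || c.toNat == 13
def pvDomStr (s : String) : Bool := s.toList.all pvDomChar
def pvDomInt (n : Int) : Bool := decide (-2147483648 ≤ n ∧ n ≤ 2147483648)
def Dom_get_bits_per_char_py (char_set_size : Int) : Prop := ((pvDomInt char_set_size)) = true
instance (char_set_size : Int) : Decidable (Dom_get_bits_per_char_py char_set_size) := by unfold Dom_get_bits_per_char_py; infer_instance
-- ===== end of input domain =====

-- B replaces A's shift-down counting of char_set_size-1 by growing a power-of-two capacity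
-- upward until it covers the set (no special-case guard needed); alternative decomposition, same cost.

-- ===== PORT A =====
-- A's while loop: counts right-shifts of temp until 0
def pvLoopA (bits_needed : Int) (temp : Int) : Int :=
  if h : 0 < temp then pvLoopA (bits_needed + 1) (PySem.Int.floordiv temp 2)
  else bits_needed
termination_by temp.toNat
decreasing_by
  have h2 : PySem.Int.floordiv temp 2 = temp / 2 := PySem.Int.floordiv_eq_ediv_of_pos (by omega)
  rw [h2]; omega

def get_bits_per_char_py (char_set_size : Int) : Int :=
  if char_set_size ≤ 1 then 1
  else pvLoopA 0 (char_set_size - 1)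

-- ===== PORT B =====
-- B's while loop: doubles capacity until it is ≥ char_set_size, counting the bits
-- (the positivity argument only justifies termination)
def pvLoopB (bits : Int) (capacity : Int) (n : Int) (hc : 0 < capacity) : Int :=
  if h : capacity < n then pvLoopB (bits + 1) (capacity * 2) n (by omega)
  else bits
termination_by (n - capacity).toNat
decreasing_by omega

def get_bits_per_char_py_alt (char_set_size : Int) : Int :=
  pvLoopB 1 2 char_set_size (by norm_num)

-- ===== PRECONDITION & SPEC =====
def Spec_get_bits_per_char_py (char_set_size : Int) (out : Int) : Prop := out = get_bits_per_char_py_alt char_set_size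
instance (char_set_size : Int) (out : Int) : Decidable (Spec_get_bits_per_char_py char_set_size out) := by unfold Spec_get_bits_per_char_py; infer_instance

-- ===== CLAIM (what is proved, stated in full; the proofs are below) =====
def Claim_equal_get_bits_per_char_py : Prop := ∀ (char_set_size : Int), Dom_get_bits_per_char_py char_set_size → Spec_get_bits_per_char_py char_set_size (get_bits_per_char_py char_set_size)

-- ===== LEMMAS AND PROOFS =====

theorem pvLoopA_eq (n : Nat) : ∀ bits : Int, pvLoopA bits (n : Int) = bits + (PySem.Int.bitLength (n : Int) : Int) := by
  induction n using Nat.strong_induction_on with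
  | _ n ih =>
    intro bits
    by_cases h : 0 < n
    · rw [pvLoopA]
      have hpos : (0 : Int) < (n : Int) := by exact_mod_cast h
      rw [dif_pos hpos]
      have hfd : PySem.Int.floordiv (n : Int) 2 = ((n / 2 : Nat) : Int) := by
        exact_mod_cast PySem.Int.floordiv_natCast n 2
      rw [hfd, ih (n / 2) (by omega), PySem.Int.bitLength_natCast h]
      push_cast; ring
    · have h0 : n = 0 := by omega
      subst h0
      rw [pvLoopA]
      simp [PySem.Int.bitLength_zero]

theorem bitLength_of_bounds (m : Int) (k : Nat)
    (hlo : (2 : Int) ^ k ≤ m) (hhi : m < (2 : Int) ^ (k + 1)) :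
    PySem.Int.bitLength m = k + 1 := by
  have hpow : (0 : Int) < 2 ^ k := by positivity
  have hm0 : m ≠ 0 := by omega
  have habs : (m.natAbs : Int) = m := Int.natAbs_of_nonneg (by omega)
  have hlo' : 2 ^ k ≤ m.natAbs := by
    have : (2 : Int) ^ k ≤ (m.natAbs : Int) := by rw [habs]; exact hlo
    exact_mod_cast this
  have hhi' : m.natAbs < 2 ^ (k + 1) := by
    have : (m.natAbs : Int) < (2 : Int) ^ (k + 1) := by rw [habs]; exact hhi
    exact_mod_cast this
  have hL1 : m.natAbs < 2 ^ PySem.Int.bitLength m := PySem.Int.lt_two_pow_bitLength m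
  have hL2 : 2 ^ (PySem.Int.bitLength m - 1) ≤ m.natAbs := PySem.Int.two_pow_bitLength_le m hm0
  have h1 : k < PySem.Int.bitLength m := by
    have : (2 : Nat) ^ k < 2 ^ PySem.Int.bitLength m := lt_of_le_of_lt hlo' hL1
    exact (Nat.pow_lt_pow_iff_right (by norm_num)).mp this
  have h2 : PySem.Int.bitLength m - 1 < k + 1 := by
    have : (2 : Nat) ^ (PySem.Int.bitLength m - 1) < 2 ^ (k + 1) := lt_of_le_of_lt hL2 hhi'
    exact (Nat.pow_lt_pow_iff_right (by norm_num)).mp this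
  omega

theorem pvLoopB_eq (n : Int) : ∀ j : Nat, ∀ (bits cap : Int) (k : Nat) (hc : 0 < cap),
    cap = 2 ^ k → (n - cap).toNat ≤ j → cap < n →
    pvLoopB bits cap n hc = bits + ((PySem.Int.bitLength (n - 1) : Int) - k) := by
  intro j
  induction j with
  | zero =>
    intro bits cap k hc hcap hj hlt
    omega
  | succ j ih =>
    intro bits cap k hc hcap hj hlt
    rw [pvLoopB, dif_pos hlt]
    by_cases h2 : cap * 2 < n
    · rw [ih (bits + 1) (cap * 2) (k + 1) (by omega) (by rw [hcap]; ring) (by omega) h2]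
      push_cast; ring
    · rw [pvLoopB, dif_neg h2]
      have hbl : PySem.Int.bitLength (n - 1) = k + 1 := by
        apply bitLength_of_bounds
        · rw [← hcap]; omega
        · have : (2 : Int) ^ (k + 1) = cap * 2 := by rw [hcap]; ring
          omega
      rw [hbl]; push_cast; ring

-- ===== VERDICT (by name: the statement is the Claim_ definition above) =====
theorem get_bits_per_char_py_spec : Claim_equal_get_bits_per_char_py := by
  intro n _
  unfold Spec_get_bits_per_char_py get_bits_per_char_py get_bits_per_char_py_alt
  by_cases h2 : n ≤ 2
  · rw [pvLoopB, dif_neg (by omega)]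
    by_cases h1 : n ≤ 1
    · rw [if_pos h1]
    · have hn2 : n = 2 := by omega
      subst hn2
      rw [if_neg h1]
      have : ((2 : Int) - 1) = ((1 : Nat) : Int) := by norm_num
      rw [this, pvLoopA_eq]
      decide
  · rw [if_neg (by omega)]
    rw [pvLoopB_eq n (n - 2).toNat 1 2 1 (by norm_num) (by norm_num) (by omega) (by omega)]
    have hm : (n - 1) = (((n - 1).toNat : Nat) : Int) := by omega
    rw [hm, pvLoopA_eq]
    push_cast; ring
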